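-- pv_equiv track=rewrite | github.com/Loxenary/Tucil1_13522157 | src/CombinationGenerator.py | check_sequence_reward
-- ===== SOURCE A (Python) =====
-- def check_sequence_reward(combination, sequences, sequence_rewards):
--     total_reward = 0
--     sequence_check = []
--     for sequence, reward in zip(sequences, sequence_rewards):
--         sequence_length = len(sequence)
--         for i in range(len(combination) - sequence_length + 1):
--
--             # check for current combination element from i till i + current sequence length, then match it to current sequence
--             # also check for no sequence used twice
--             if combination[i:i+sequence_length] == sequence and (sequence not in sequence_check):
--                 total_reward += reward
--                 sequence_check.append(sequence)
--
--     return total_reward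
-- ===== SOURCE B (Python) =====
-- def check_sequence_reward(combination, sequences, sequence_rewards):
--     n = len(combination)
--     lengths = {len(s) for s in sequences}
--     subs = {tuple(combination[i:i+L]) for L in lengths for i in range(n - L + 1)}
--     total = 0
--     seen = set()
--     for sequence, reward in zip(sequences, sequence_rewards):
--         key = tuple(sequence)
--         if key in subs and key not in seen:
--             total += reward
--             seen.add(key)
--     return total
-- ===== Notes on version B (the rewrite author's own statement) =====
-- stated objective: faster
-- what changed: Replaces the per-sequence positional scan of combination with a precomputed set of all substrings of the occurring lengths plus a single pass over the (sequence, reward) pairs with O(1) set lookups.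
import Mathlib
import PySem

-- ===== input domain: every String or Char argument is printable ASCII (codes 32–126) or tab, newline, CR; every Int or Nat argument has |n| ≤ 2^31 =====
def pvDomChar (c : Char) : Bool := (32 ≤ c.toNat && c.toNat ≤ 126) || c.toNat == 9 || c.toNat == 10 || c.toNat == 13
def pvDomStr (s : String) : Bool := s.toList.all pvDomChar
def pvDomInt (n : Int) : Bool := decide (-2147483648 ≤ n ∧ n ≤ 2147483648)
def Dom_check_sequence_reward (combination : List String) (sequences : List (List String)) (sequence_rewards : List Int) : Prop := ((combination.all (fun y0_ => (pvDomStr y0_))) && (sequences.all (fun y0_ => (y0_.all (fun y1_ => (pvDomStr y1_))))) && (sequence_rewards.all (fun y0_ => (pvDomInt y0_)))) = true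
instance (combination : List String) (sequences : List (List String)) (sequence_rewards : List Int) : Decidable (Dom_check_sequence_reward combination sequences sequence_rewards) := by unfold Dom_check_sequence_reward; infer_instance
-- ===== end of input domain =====

-- B replaces A's per-sequence positional scan with a precomputed set of the substrings of the
-- occurring lengths plus one pass over the (sequence, reward) pairs (objective: faster).

-- ===== PORT A =====
def check_sequence_reward (combination : List String) (sequences : List (List String)) (sequence_rewards : List Int) : Int :=
  (((sequences.zip sequence_rewards).foldl (fun st p =>
      let L := PySem.List.len p.1
      (PySem.List.pyRange 0 (PySem.List.len combination - L + 1) 1).foldl (fun st2 i =>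
        if PySem.List.slice combination (some i) (some (i + L)) = p.1 ∧ p.1 ∉ st2.2
        then (st2.1 + p.2, st2.2 ++ [p.1]) else st2) st)
    ((0 : Int), ([] : List (List String))))).1

-- ===== PORT B =====
-- (Source B canonicalises each list slice / sequence with tuple(); under the type convention both a
-- Python list and a tuple of strings are List String, so the key is the list itself.)
def check_sequence_reward_alt (combination : List String) (sequences : List (List String)) (sequence_rewards : List Int) : Int :=
  let n := PySem.List.len combination
  let lengths : PySem.Set Int := PySem.Set.ofList (sequences.map PySem.List.len)
  let subs : PySem.Set (List String) := PySem.Set.ofList (lengths.flatMap (fun L =>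
      (PySem.List.pyRange 0 (n - L + 1) 1).map (fun i =>
        PySem.List.slice combination (some i) (some (i + L)))))
  (((sequences.zip sequence_rewards).foldl (fun st p =>
      if PySem.Set.contains subs p.1 ∧ p.1 ∉ st.2
      then (st.1 + p.2, PySem.Set.add st.2 p.1) else st)
    ((0 : Int), (PySem.Set.empty : PySem.Set (List String))))).1

-- ===== PRECONDITION & SPEC =====
def Spec_check_sequence_reward (combination : List String) (sequences : List (List String)) (sequence_rewards : List Int) (out : Int) : Prop := out = check_sequence_reward_alt combination sequences sequence_rewards
instance (combination : List String) (sequences : List (List String)) (sequence_rewards : List Int) (out : Int) : Decidable (Spec_check_sequence_reward combination sequences sequence_rewards out) := by unfold Spec_check_sequence_reward; infer_instance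

-- ===== CLAIM (what is proved, stated in full; the proofs are below) =====
def Claim_equal_check_sequence_reward : Prop := ∀ (combination : List String) (sequences : List (List String)) (sequence_rewards : List Int), Dom_check_sequence_reward combination sequences sequence_rewards → Spec_check_sequence_reward combination sequences sequence_rewards (check_sequence_reward combination sequences sequence_rewards)

-- ===== LEMMAS AND PROOFS =====

-- A's inner scan is a no-op once the sequence is already recorded.
theorem innerA_of_mem (combination : List String) (seq : List String) (r L : Int)
    (l : List Int) (st : Int × List (List String)) (h : seq ∈ st.2) :
    l.foldl (fun st2 i =>
        if PySem.List.slice combination (some i) (some (i + L)) = seq ∧ seq ∉ st2.2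
        then (st2.1 + r, st2.2 ++ [seq]) else st2) st = st := by
  induction l generalizing st with
  | nil => rfl
  | cons i l ih =>
    simp only [List.foldl_cons]
    rw [if_neg (by simp [h]), ih st h]

-- A's inner scan collapses to a single conditional update on "some position matches".
theorem innerA_collapse (combination : List String) (seq : List String) (r L : Int)
    (l : List Int) (st : Int × List (List String)) :
    l.foldl (fun st2 i =>
        if PySem.List.slice combination (some i) (some (i + L)) = seq ∧ seq ∉ st2.2
        then (st2.1 + r, st2.2 ++ [seq]) else st2) st
    = if (∃ i ∈ l, PySem.List.slice combination (some i) (some (i + L)) = seq) ∧ seq ∉ st.2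
      then (st.1 + r, st.2 ++ [seq]) else st := by
  induction l generalizing st with
  | nil => simp
  | cons i l ih =>
    simp only [List.foldl_cons]
    by_cases hm : seq ∈ st.2
    · rw [if_neg (by simp [hm]), innerA_of_mem _ _ _ _ _ _ hm, if_neg (by simp [hm])]
    · by_cases hi : PySem.List.slice combination (some i) (some (i + L)) = seq
      · rw [if_pos ⟨hi, hm⟩, innerA_of_mem _ _ _ _ _ _ (by simp),
          if_pos ⟨⟨i, by simp, hi⟩, hm⟩]
      · rw [if_neg (by simp [hi]), ih st]
        congr 1
        simp [hi]

-- a slice of nonnegative length L entirely inside the list has length L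
theorem len_slice_inside {α : Type} (xs : List α) (i L : Int) (h0 : 0 ≤ i) (hL : 0 ≤ L)
    (hn : i + L ≤ PySem.List.len xs) :
    PySem.List.len (PySem.List.slice xs (some i) (some (i + L))) = L := by
  simp only [PySem.List.len_eq] at hn ⊢
  rw [PySem.List.slice_of_nonneg xs h0 (by omega) (by omega) (by omega)]
  simp only [List.length_take, List.length_drop]
  omega

-- seq is in B's substring table iff some position of A's scan range matches, provided
-- seq's length occurs among the lengths of sequences.
theorem mem_subs_iff (combination : List String) (sequences : List (List String))
    (seq : List String) (hlen : PySem.List.len seq ∈ sequences.map PySem.List.len) :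
    (seq ∈ PySem.Set.ofList ((PySem.Set.ofList (sequences.map PySem.List.len)).flatMap (fun L =>
        (PySem.List.pyRange 0 (PySem.List.len combination - L + 1) 1).map (fun i =>
          PySem.List.slice combination (some i) (some (i + L))))))
    ↔ ∃ i ∈ PySem.List.pyRange 0 (PySem.List.len combination - PySem.List.len seq + 1) 1,
        PySem.List.slice combination (some i) (some (i + PySem.List.len seq)) = seq := by
  rw [PySem.Set.mem_ofList]
  simp only [List.mem_flatMap, List.mem_map]
  constructor
  · rintro ⟨L, hL, i, hi, hslice⟩
    have hLnn : 0 ≤ L := by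
      rw [PySem.Set.mem_ofList] at hL
      obtain ⟨s, _, rfl⟩ := List.mem_map.mp hL
      simp [PySem.List.len_eq]
    rw [PySem.List.mem_pyRange_one] at hi
    have hlenL : PySem.List.len seq = L := by
      rw [← hslice]
      exact len_slice_inside _ _ _ hi.1 hLnn (by omega)
    exact ⟨i, by rw [hlenL, PySem.List.mem_pyRange_one]; omega, by rw [hlenL]; exact hslice⟩
  · rintro ⟨i, hi, hslice⟩
    exact ⟨PySem.List.len seq, (PySem.Set.mem_ofList _ _).mpr hlen, i, hi, hslice⟩

-- main loop correspondence, with the shared state generalised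
theorem loop_eq (combination : List String) (sequences : List (List String))
    (l : List (List String × Int))
    (hsub : ∀ p ∈ l, PySem.List.len p.1 ∈ sequences.map PySem.List.len)
    (st : Int × List (List String)) :
    l.foldl (fun st p =>
      let L := PySem.List.len p.1
      (PySem.List.pyRange 0 (PySem.List.len combination - L + 1) 1).foldl (fun st2 i =>
        if PySem.List.slice combination (some i) (some (i + L)) = p.1 ∧ p.1 ∉ st2.2
        then (st2.1 + p.2, st2.2 ++ [p.1]) else st2) st) st
    = l.foldl (fun st p =>
      if PySem.Set.contains (PySem.Set.ofList ((PySem.Set.ofList (sequences.map PySem.List.len)).flatMap (fun L =>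
            (PySem.List.pyRange 0 (PySem.List.len combination - L + 1) 1).map (fun i =>
              PySem.List.slice combination (some i) (some (i + L)))))) p.1 ∧ p.1 ∉ st.2
      then (st.1 + p.2, PySem.Set.add st.2 p.1) else st) st := by
  induction l generalizing st with
  | nil => rfl
  | cons p l ih =>
    simp only [List.foldl_cons]
    rw [innerA_collapse]
    have hmem := mem_subs_iff combination sequences p.1 (hsub p (by simp))
    have hguard : ((∃ i ∈ PySem.List.pyRange 0 (PySem.List.len combination - PySem.List.len p.1 + 1) 1,
        PySem.List.slice combination (some i) (some (i + PySem.List.len p.1)) = p.1) ∧ p.1 ∉ st.2)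
        ↔ (PySem.Set.contains (PySem.Set.ofList ((PySem.Set.ofList (sequences.map PySem.List.len)).flatMap (fun L =>
            (PySem.List.pyRange 0 (PySem.List.len combination - L + 1) 1).map (fun i =>
              PySem.List.slice combination (some i) (some (i + L)))))) p.1 ∧ p.1 ∉ st.2) := by
      rw [PySem.Set.contains_iff, hmem]
    split_ifs with h1 h2 h2
    · rw [PySem.Set.add_of_not_mem h1.2]
      exact ih (fun q hq => hsub q (List.mem_cons_of_mem _ hq)) _
    · exact absurd (hguard.mp h1) h2
    · exact absurd (hguard.mpr h2) h1
    · exact ih (fun q hq => hsub q (List.mem_cons_of_mem _ hq)) _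

-- ===== VERDICT (by name: the statement is the Claim_ definition above) =====
theorem check_sequence_reward_spec : Claim_equal_check_sequence_reward := by
  intro combination sequences sequence_rewards _
  unfold Spec_check_sequence_reward check_sequence_reward check_sequence_reward_alt
  have h := loop_eq combination sequences (sequences.zip sequence_rewards)
    (fun p hp => List.mem_map.mpr ⟨p.1, (List.of_mem_zip hp).1, rfl⟩)
    ((0 : Int), ([] : List (List String)))
  simp only []
  rw [h]
  rfl
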